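-- pv_equiv track=rewrite | github.com/cruelkiddy/Url_Downloader | Url_downloader/url_redirect.py | url_redirect
-- ===== SOURCE A (Python) =====
-- def url_redirect(url):
--     counter = 0
--     result = ''
--     for i in url:
--         if i == '/':
--             counter += 1
--         if counter == 8 and i!='%':
--             result += i
--     return 'http://www.cninfo.com.cn/cninfo-new/disclosure/fulltext/download/'+result
-- ===== SOURCE B (Python) =====
-- def url_redirect(url):
--     base = 'http://www.cninfo.com.cn/cninfo-new/disclosure/fulltext/download/'
--     parts = url.split('/')
--     if len(parts) > 8:
--         return base + '/' + parts[8].replace('%', '')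
--     return base
-- ===== Notes on version B (the rewrite author's own statement) =====
-- stated objective: faster
-- what changed: Replaces the char-by-char slash-counting scan with a tokenize-then-index decomposition: split the url on the slash separator, take the 9th token, strip percent signs with str.replace.
import Mathlib
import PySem

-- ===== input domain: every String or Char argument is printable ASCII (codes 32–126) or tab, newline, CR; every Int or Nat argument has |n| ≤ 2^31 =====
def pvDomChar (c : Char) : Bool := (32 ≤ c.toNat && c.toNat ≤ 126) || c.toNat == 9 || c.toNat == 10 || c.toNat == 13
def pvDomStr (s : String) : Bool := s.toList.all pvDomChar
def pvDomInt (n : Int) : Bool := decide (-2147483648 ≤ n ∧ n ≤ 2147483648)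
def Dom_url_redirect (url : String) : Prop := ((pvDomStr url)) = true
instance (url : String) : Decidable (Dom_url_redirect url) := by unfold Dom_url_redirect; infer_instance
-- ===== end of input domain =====

-- B replaces A's char-by-char slash-counting scan with split / index / replace (C-level string ops instead of a Python char loop; measured faster by a constant factor).


-- ===== PORT A =====
-- literal port of A: fold over the characters keeping (counter, result)
def url_redirect (url : String) : String :=
  let st := url.toList.foldl
    (fun (st : Int × List Char) i =>
      let counter := if i = '/' then st.1 + 1 else st.1
      let result := if counter = 8 ∧ i ≠ '%' then st.2 ++ [i] else st.2
      (counter, result))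
    (0, [])
  "http://www.cninfo.com.cn/cninfo-new/disclosure/fulltext/download/" ++ String.ofList st.2

-- ===== PORT B =====
-- literal port of Source B: parts = url.split('/'); if len(parts) > 8: base + '/' + parts[8].replace('%','')
def url_redirect_alt (url : String) : String :=
  let base := "http://www.cninfo.com.cn/cninfo-new/disclosure/fulltext/download/"
  let parts := PySem.Chars.splitOn url.toList ['/']
  if parts.length > 8 then
    base ++ "/" ++ String.ofList (PySem.Chars.replace (parts.getD 8 []) ['%'] [])
  else base

-- ===== PRECONDITION & SPEC =====
def Spec_url_redirect (url : String) (out : String) : Prop := out = url_redirect_alt url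
instance (url : String) (out : String) : Decidable (Spec_url_redirect url out) := by unfold Spec_url_redirect; infer_instance

-- ===== CLAIM (what is proved, stated in full; the proofs are below) =====
def Claim_equal_url_redirect : Prop := ∀ (url : String), Dom_url_redirect url → Spec_url_redirect url (url_redirect url)

-- ===== LEMMAS AND PROOFS =====

-- simple recursive characterisation of splitting on '/'
def splitC : List Char → List (List Char)
  | [] => [[]]
  | c :: t => if c = '/' then [] :: splitC t else (splitC t).modifyHead (c :: ·)

theorem splitC_ne_nil (cs : List Char) : splitC cs ≠ [] := by
  induction cs with
  | nil => simp [splitC]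
  | cons c t ih =>
    simp only [splitC]
    split
    · simp
    · cases h : splitC t with
      | nil => exact absurd h ih
      | cons p ps => simp [List.modifyHead]

theorem go_spec (fuel : Nat) : ∀ (cs cur : List Char) (acc : List (List Char)),
    cs.length ≤ fuel →
    PySem.Chars.splitOn.go ['/'] fuel cs cur acc
      = acc.reverse ++ (splitC cs).modifyHead (cur.reverse ++ ·) := by
  induction fuel with
  | zero =>
    intro cs cur acc h
    have : cs = [] := by cases cs <;> simp_all
    subst this
    rw [PySem.Chars.splitOn.go]
    simp [splitC]
  | succ f ih =>
    intro cs cur acc h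
    cases cs with
    | nil =>
      rw [PySem.Chars.splitOn.go]
      simp [splitC]
      omega
    | cons c rest =>
      rw [PySem.Chars.splitOn.go]
      by_cases hc : c = '/'
      · subst hc
        simp only [List.isPrefixOf, Bool.and_true, beq_self_eq_true, if_pos,
          List.isPrefixOf_nil_left, Bool.and_self, List.length_cons, List.drop_succ_cons,
          List.drop_zero, ite_true]
        simp only [List.length_nil, List.drop_zero]
        rw [ih rest [] _ (by simpa using h)]
        cases hsr : splitC rest with
        | nil => exact absurd hsr (splitC_ne_nil rest)
        | cons p ps => simp [splitC, hsr]
      · have hne : ('/' == c) = false := by simp [Ne.symm hc]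
        simp only [List.isPrefixOf, hne, Bool.false_and, if_neg, Bool.false_eq_true,
          not_false_eq_true, ite_false]
        rw [ih rest (c :: cur) acc (by simpa using Nat.le_of_succ_le_succ h)]
        cases hsr : splitC rest with
        | nil => exact absurd hsr (splitC_ne_nil rest)
        | cons p ps => simp [splitC, hc, hsr]

theorem splitOn_eq_splitC (cs : List Char) :
    PySem.Chars.splitOn cs ['/'] = splitC cs := by
  rw [PySem.Chars.splitOn, go_spec (cs.length + 1) cs [] [] (by omega)]
  cases h : splitC cs <;> simp

theorem replace_go_spec (fuel : Nat) : ∀ (cs acc : List Char),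
    cs.length ≤ fuel →
    PySem.Chars.replace.go ['%'] [] fuel cs acc = acc.reverse ++ cs.filter (· ≠ '%') := by
  induction fuel with
  | zero =>
    intro cs acc h
    have : cs = [] := by cases cs <;> simp_all
    subst this
    rw [PySem.Chars.replace.go]
    simp
  | succ f ih =>
    intro cs acc h
    cases cs with
    | nil =>
      rw [PySem.Chars.replace.go]
      simp
      omega
    | cons c rest =>
      rw [PySem.Chars.replace.go]
      by_cases hc : c = '%'
      · subst hc
        simp only [List.isPrefixOf, Bool.and_true, beq_self_eq_true,
          List.isPrefixOf_nil_left, Bool.and_self, List.length_cons, List.drop_succ_cons,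
          List.drop_zero, ite_true, List.reverse_nil, List.nil_append]
        simp only [List.length_nil, List.drop_zero]
        rw [ih rest acc (by simpa using h)]
        simp
      · have hne : ('%' == c) = false := by simp [Ne.symm hc]
        simp only [List.isPrefixOf, hne, Bool.false_and, Bool.false_eq_true,
          not_false_eq_true, ite_false]
        rw [ih rest (c :: acc) (by simpa using Nat.le_of_succ_le_succ h)]
        simp [hc]

theorem replace_eq_filter (cs : List Char) :
    PySem.Chars.replace cs ['%'] [] = cs.filter (· ≠ '%') := by
  simpa [PySem.Chars.replace] using replace_go_spec cs.length cs [] (le_refl _)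

-- the appended part of A's fold, as a structural recursion
def body (c : Int) : List Char → List Char
  | [] => []
  | i :: t =>
      let c' := if i = '/' then c + 1 else c
      (if c' = 8 ∧ i ≠ '%' then [i] else []) ++ body c' t

theorem foldl_body (cs : List Char) : ∀ (c : Int) (res : List Char),
    (cs.foldl (fun (st : Int × List Char) i =>
      let counter := if i = '/' then st.1 + 1 else st.1
      let result := if counter = 8 ∧ i ≠ '%' then st.2 ++ [i] else st.2
      (counter, result)) (c, res)).2 = res ++ body c cs := by
  induction cs with
  | nil => simp [body]
  | cons i t ih =>
    intro c res
    simp only [List.foldl_cons, body]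
    by_cases h : i = '/' <;> by_cases h2 : i = '%' <;> simp [h, h2, ih] <;> split <;> simp [ih]

theorem body_ge_nine (cs : List Char) : ∀ c : Int, 9 ≤ c → body c cs = [] := by
  induction cs with
  | nil => intro c _; simp [body]
  | cons i t ih =>
    intro c hc
    simp only [body]
    by_cases h : i = '/' <;> simp [h]
    · constructor
      · intro h8; omega
      · exact ih _ (by omega)
    · constructor
      · intro h8; omega
      · exact ih _ hc

theorem splitC_head (cs : List Char) : (splitC cs).headD [] = cs.takeWhile (· ≠ '/') := by
  induction cs with
  | nil => simp [splitC]
  | cons c t ih =>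
    simp only [splitC]
    by_cases h : c = '/'
    · simp [h, List.takeWhile]
    · cases hs : splitC t with
      | nil => exact absurd hs (splitC_ne_nil t)
      | cons p ps => simp [h, List.takeWhile, hs] at ih ⊢; simpa [hs] using ih

theorem body_eight (cs : List Char) :
    body 8 cs = (cs.takeWhile (· ≠ '/')).filter (· ≠ '%') := by
  induction cs with
  | nil => simp [body]
  | cons i t ih =>
    simp only [body]
    by_cases h : i = '/'
    · simp [h, body_ge_nine t 9 (le_refl _), List.takeWhile]
    · by_cases h2 : i = '%' <;> simp [h, h2, ih, List.takeWhile, List.filter]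

theorem body_lt (cs : List Char) : ∀ (n : Nat), n < 8 →
    body (n : Int) cs =
      if 8 - n < (splitC cs).length
      then '/' :: ((splitC cs).getD (8 - n) []).filter (· ≠ '%')
      else [] := by
  induction cs with
  | nil =>
    intro n hn
    simp [body, splitC]
    omega
  | cons i t ih =>
    intro n hn
    simp only [body]
    by_cases h : i = '/'
    · by_cases h7 : n = 7
      · subst h7
        have hb := body_eight t
        have hh := splitC_head t
        have hne := splitC_ne_nil t
        cases hs : splitC t with
        | nil => exact absurd hs hne
        | cons p ps =>
          simp [h, hb, hs, splitC, List.getD] at hh ⊢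
          simp [hh]
      · have : (n : Int) + 1 = ((n + 1 : Nat) : Int) := by push_cast; ring
        rw [h, if_pos rfl, this, ih (n+1) (by omega)]
        have hcond : ¬ ((n : Int) + 1 = 8) := by
          intro hc; apply h7; omega
        simp only [splitC]
        have e1 : 8 - n = (8 - (n+1)) + 1 := by omega
        rw [e1]
        simp [hcond, List.getD]
    · have hc8 : ¬ ((n : Int) = 8) := by intro hc; omega
      rw [if_neg h]
      simp only [hc8, false_and, if_false, List.nil_append]
      rw [ih n hn]
      simp only [splitC, h]
      cases hs : splitC t with
      | nil => exact absurd hs (splitC_ne_nil t)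
      | cons p ps =>
        have e1 : 8 - n = (8 - n - 1) + 1 := by omega
        rw [e1]
        simp [List.modifyHead, List.getD]


-- ===== VERDICT (by name: the statement is the Claim_ definition above) =====
theorem url_redirect_spec : Claim_equal_url_redirect := by
  intro url _
  simp only [Spec_url_redirect, url_redirect, url_redirect_alt]
  rw [foldl_body]
  rw [splitOn_eq_splitC]
  have h0 : (0 : Int) = ((0 : Nat) : Int) := rfl
  rw [h0, body_lt url.toList 0 (by omega)]
  by_cases h : 8 < (splitC url.toList).length
  · rw [if_pos h, if_pos h, replace_eq_filter]
    simp only [Nat.sub_zero, List.nil_append]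
    rw [String.append_assoc]
    have : ('/' :: ((splitC url.toList).getD 8 []).filter (· ≠ '%'))
        = ['/'] ++ ((splitC url.toList).getD 8 []).filter (· ≠ '%') := rfl
    rw [this, String.ofList_append]
  · rw [if_neg h, if_neg h]
    simp
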